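-- pv_equiv track=rewrite | github.com/goncalog01/advent-of-code | 2022/18/part2.py | slice_to_str
-- ===== SOURCE A (Python) =====
-- def slice_to_str(cubes, range_x, range_y, z):
--     slice = []
--     for y in range(range_y[0], range_y[1] + 1):
--         s = ""
--         for x in range(range_x[0], range_x[1] + 1):
--             if [x, y, z] in cubes:
--                 s += "#"
--             else:
--                 s += "."
--         slice.append(s)
--     return slice
-- ===== SOURCE B (Python) =====
-- def slice_to_str(cubes, range_x, range_y, z):
--     x0, x1 = range_x[0], range_x[1]
--     y0, y1 = range_y[0], range_y[1]
--     h = max(y1 + 1 - y0, 0)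
--     w = max(x1 + 1 - x0, 0)
--     rows = [["."] * w for _ in range(h)]
--     for c in cubes:
--         if len(c) == 3 and c[2] == z and x0 <= c[0] <= x1 and y0 <= c[1] <= y1:
--             rows[c[1] - y0][c[0] - x0] = "#"
--     return ["".join(row) for row in rows]
-- ===== Notes on version B (the rewrite author's own statement) =====
-- stated objective: alternative
-- what changed: B preallocates the h x w grid of '.' rows and scatters each in-window cube of the slice into it in one pass over cubes, instead of A's per-cell scan that tests list membership of [x,y,z] in cubes for every grid cell.
-- outside the precondition, e.g. on slice_to_str([], [5], [1, 0], 0): A returns [], B raises IndexError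
import Mathlib
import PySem

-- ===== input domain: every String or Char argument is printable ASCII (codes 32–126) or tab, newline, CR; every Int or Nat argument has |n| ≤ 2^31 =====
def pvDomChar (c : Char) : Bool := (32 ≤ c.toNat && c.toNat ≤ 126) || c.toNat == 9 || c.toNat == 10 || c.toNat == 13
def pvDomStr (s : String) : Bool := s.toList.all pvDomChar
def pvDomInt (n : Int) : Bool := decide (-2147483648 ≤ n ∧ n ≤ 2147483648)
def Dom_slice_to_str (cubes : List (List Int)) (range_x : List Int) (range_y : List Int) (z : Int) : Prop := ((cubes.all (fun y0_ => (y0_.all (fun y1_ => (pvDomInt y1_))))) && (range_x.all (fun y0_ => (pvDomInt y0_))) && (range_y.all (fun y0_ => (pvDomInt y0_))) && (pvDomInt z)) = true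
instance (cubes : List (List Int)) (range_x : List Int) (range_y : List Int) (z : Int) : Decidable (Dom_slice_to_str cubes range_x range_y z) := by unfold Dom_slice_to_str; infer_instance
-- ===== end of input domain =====

-- B scatters each in-window cube of the z-slice into a preallocated '.'-grid in one pass
-- over cubes, instead of A's per-cell membership scan of the whole cube list.

-- ===== PORT A =====
-- literal transliteration of A: for y in range(ry[0], ry[1]+1): build s over x in range(rx[0], rx[1]+1)
def slice_to_str (cubes : List (List Int)) (range_x : List Int) (range_y : List Int) (z : Int) : List String :=
  (PySem.List.pyRange (PySem.List.pyGetD range_y 0 0) (PySem.List.pyGetD range_y 1 0 + 1) 1).foldl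
    (fun slice y =>
      slice ++ [(PySem.List.pyRange (PySem.List.pyGetD range_x 0 0) (PySem.List.pyGetD range_x 1 0 + 1) 1).foldl
        (fun s x => if [x, y, z] ∈ cubes then s ++ "#" else s ++ ".") ""])
    []

-- ===== PORT B =====
-- the body of Source B's `for c in cubes` loop: mark the cube's cell if it lies in the slice window
def pvBUpdate (z x0 x1 y0 y1 : Int) (g : List (List Char)) (c : List Int) : List (List Char) :=
  match c with
  | [cx, cy, cz] =>
    if cz = z ∧ x0 ≤ cx ∧ cx ≤ x1 ∧ y0 ≤ cy ∧ cy ≤ y1 then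
      g.modify (cy - y0).toNat (fun r => r.set (cx - x0).toNat '#')
    else g
  | _ => g

def slice_to_str_alt (cubes : List (List Int)) (range_x : List Int) (range_y : List Int) (z : Int) : List String :=
  let x0 := PySem.List.pyGetD range_x 0 0
  let x1 := PySem.List.pyGetD range_x 1 0
  let y0 := PySem.List.pyGetD range_y 0 0
  let y1 := PySem.List.pyGetD range_y 1 0
  let h := (y1 + 1 - y0).toNat   -- max(y1 + 1 - y0, 0)
  let w := (x1 + 1 - x0).toNat   -- max(x1 + 1 - x0, 0)
  let rows := (List.range h).map (fun _ => List.replicate w '.')   -- [["."] * w for _ in range(h)]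
  let rows := cubes.foldl (pvBUpdate z x0 x1 y0 y1) rows
  rows.map (fun r => String.ofList r)

-- ===== PRECONDITION & SPEC =====
-- Pre_ requires both range lists to have at least two elements: with fewer, A raises IndexError —
-- except the corner of a short range_x together with an empty y-range, where A returns [] without
-- ever reading range_x while B (which reads both ranges upfront) raises; that corner is excluded.
def Pre_slice_to_str (cubes : List (List Int)) (range_x : List Int) (range_y : List Int) (z : Int) : Prop :=
  2 ≤ range_x.length ∧ 2 ≤ range_y.length
instance (cubes : List (List Int)) (range_x : List Int) (range_y : List Int) (z : Int) : Decidable (Pre_slice_to_str cubes range_x range_y z) := by unfold Pre_slice_to_str; infer_instance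

def pvWitness_slice_to_str : List (List Int) × List Int × List Int × Int :=
  ([[0, 0, 0], [1, 1, 0]], [0, 1], [0, 1], 0)

def Spec_slice_to_str (cubes : List (List Int)) (range_x : List Int) (range_y : List Int) (z : Int) (out : List String) : Prop := out = slice_to_str_alt cubes range_x range_y z
instance (cubes : List (List Int)) (range_x : List Int) (range_y : List Int) (z : Int) (out : List String) : Decidable (Spec_slice_to_str cubes range_x range_y z out) := by unfold Spec_slice_to_str; infer_instance

-- ===== CLAIM (what is proved, stated in full; the proofs are below) =====
def Claim_equal_slice_to_str : Prop := ∀ (cubes : List (List Int)) (range_x : List Int) (range_y : List Int) (z : Int), Dom_slice_to_str cubes range_x range_y z → Pre_slice_to_str cubes range_x range_y z → Spec_slice_to_str cubes range_x range_y z (slice_to_str cubes range_x range_y z)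

-- ===== LEMMAS AND PROOFS =====

lemma pvBUpdate_length (z x0 x1 y0 y1 : Int) (g : List (List Char)) (c : List Int) :
    (pvBUpdate z x0 x1 y0 y1 g c).length = g.length := by
  match c with
  | [] => rfl
  | [_] => rfl
  | [_, _] => rfl
  | [cx, cy, cz] => simp only [pvBUpdate]; split <;> simp
  | _ :: _ :: _ :: _ :: _ => rfl

lemma pvBUpdate_rowlen (z x0 x1 y0 y1 : Int) (g : List (List Char)) (c : List Int) (n : Nat)
    (hr : ∀ r ∈ g, r.length = n) : ∀ r ∈ pvBUpdate z x0 x1 y0 y1 g c, r.length = n := by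
  match c with
  | [] => exact hr
  | [_] => exact hr
  | [_, _] => exact hr
  | [cx, cy, cz] =>
    simp only [pvBUpdate]
    split
    · intro r hrm
      rw [List.mem_iff_getElem?] at hrm
      obtain ⟨k, hk⟩ := hrm
      rw [List.getElem?_modify] at hk
      cases hg : g[k]? with
      | none => simp [hg] at hk
      | some r0 =>
        have hr0 : r0.length = n := hr r0 (List.mem_of_getElem? hg)
        rw [hg] at hk
        have hk' : (if (cy - y0).toNat = k then r0.set (cx - x0).toNat '#' else r0) = r := by
          simpa using hk
        subst hk'
        split <;> simp [hr0]
    · exact hr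
  | _ :: _ :: _ :: _ :: _ => exact hr

lemma pvBUpdate_cell (z x0 x1 y0 y1 : Int) (g : List (List Char)) (c : List Int) (i j : Nat)
    (hg : g.length = (y1 + 1 - y0).toNat) (hr : ∀ r ∈ g, r.length = (x1 + 1 - x0).toNat)
    (hi : i < g.length) (hj : j < (x1 + 1 - x0).toNat) :
    (pvBUpdate z x0 x1 y0 y1 g c)[i]?.bind (fun r => r[j]?) =
      if c = [x0 + (j : Int), y0 + (i : Int), z] then some '#'
      else g[i]?.bind (fun r => r[j]?) := by
  have hi' : i < (y1 + 1 - y0).toNat := hg ▸ hi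
  have hy : y0 + (i : Int) ≤ y1 := by omega
  have hx : x0 + (j : Int) ≤ x1 := by omega
  match c with
  | [] => simp [pvBUpdate]
  | [_] => simp [pvBUpdate]
  | [_, _] => simp [pvBUpdate]
  | _ :: _ :: _ :: _ :: _ => simp [pvBUpdate]
  | [cx, cy, cz] =>
    simp only [pvBUpdate]
    by_cases hcond : cz = z ∧ x0 ≤ cx ∧ cx ≤ x1 ∧ y0 ≤ cy ∧ cy ≤ y1
    · rw [if_pos hcond]
      obtain ⟨h1, h2, h3, h4, h5⟩ := hcond
      rw [List.getElem?_modify, List.getElem?_eq_getElem hi]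
      have hrl : g[i].length = (x1 + 1 - x0).toNat := hr _ (List.getElem_mem hi)
      by_cases hcy : (cy - y0).toNat = i
      · have hcy' : cy = y0 + (i : Int) := by omega
        by_cases hcx : (cx - x0).toNat = j
        · have hcx' : cx = x0 + (j : Int) := by omega
          simp [hcy, hcx, hcy', hcx', h1, List.getElem?_set, hrl, hj]
        · have hcx' : cx ≠ x0 + (j : Int) := by omega
          simp [hcy, hcy', hcx', List.getElem?_set, hcx, List.getElem?_eq_getElem hi]
      · have hcy' : cy ≠ y0 + (i : Int) := by omega
        simp [hcy, hcy', List.getElem?_eq_getElem hi]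
    · rw [if_neg hcond]
      have hne : ¬ ([cx, cy, cz] = [x0 + (j : Int), y0 + (i : Int), z]) := by
        intro he
        simp only [List.cons.injEq, and_true] at he
        obtain ⟨e1, e2, e3⟩ := he
        exact hcond ⟨e3, by omega, by omega, by omega, by omega⟩
      rw [if_neg hne]

lemma pvFold_length (z x0 x1 y0 y1 : Int) (cubes : List (List Int)) :
    ∀ (g : List (List Char)), (cubes.foldl (pvBUpdate z x0 x1 y0 y1) g).length = g.length := by
  induction cubes with
  | nil => intro g; rfl
  | cons c cs ih =>
    intro g
    rw [List.foldl_cons, ih, pvBUpdate_length]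

lemma pvFold_rowlen (z x0 x1 y0 y1 : Int) (cubes : List (List Int)) (n : Nat) :
    ∀ (g : List (List Char)), (∀ r ∈ g, r.length = n) →
      ∀ r ∈ cubes.foldl (pvBUpdate z x0 x1 y0 y1) g, r.length = n := by
  induction cubes with
  | nil => intro g hg; exact hg
  | cons c cs ih =>
    intro g hg
    rw [List.foldl_cons]
    exact ih _ (pvBUpdate_rowlen z x0 x1 y0 y1 g c n hg)

lemma pvFold_cell (z x0 x1 y0 y1 : Int) (cubes : List (List Int)) (i j : Nat) :
    ∀ (g : List (List Char)), g.length = (y1 + 1 - y0).toNat →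
      (∀ r ∈ g, r.length = (x1 + 1 - x0).toNat) →
      i < g.length → j < (x1 + 1 - x0).toNat →
      (cubes.foldl (pvBUpdate z x0 x1 y0 y1) g)[i]?.bind (fun r => r[j]?) =
        if [x0 + (j : Int), y0 + (i : Int), z] ∈ cubes then some '#'
        else g[i]?.bind (fun r => r[j]?) := by
  induction cubes with
  | nil => intro g _ _ _ _; simp
  | cons c cs ih =>
    intro g hg hr hi hj
    rw [List.foldl_cons]
    have hlen : (pvBUpdate z x0 x1 y0 y1 g c).length = g.length := pvBUpdate_length ..
    rw [ih _ (by rw [hlen, hg]) (pvBUpdate_rowlen z x0 x1 y0 y1 g c _ hr) (by rw [hlen]; exact hi) hj]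
    rw [pvBUpdate_cell z x0 x1 y0 y1 g c i j hg hr hi hj]
    by_cases hc : [x0 + (j : Int), y0 + (i : Int), z] = c
    · simp [← hc]
    · by_cases hm : [x0 + (j : Int), y0 + (i : Int), z] ∈ cs <;>
        simp [List.mem_cons, hc, hm, Ne.symm hc]

-- B's result in closed form
lemma pvAlt_eq (cubes : List (List Int)) (range_x range_y : List Int) (z : Int) :
    slice_to_str_alt cubes range_x range_y z =
      (List.range (PySem.List.pyGetD range_y 1 0 + 1 - PySem.List.pyGetD range_y 0 0).toNat).map
        (fun (i : Nat) => String.ofList ((List.range (PySem.List.pyGetD range_x 1 0 + 1 - PySem.List.pyGetD range_x 0 0).toNat).map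
          (fun (j : Nat) => if [PySem.List.pyGetD range_x 0 0 + (j : Int), PySem.List.pyGetD range_y 0 0 + (i : Int), z] ∈ cubes then '#' else '.'))) := by
  set x0 := PySem.List.pyGetD range_x 0 0 with hx0
  set x1 := PySem.List.pyGetD range_x 1 0 with hx1
  set y0 := PySem.List.pyGetD range_y 0 0 with hy0
  set y1 := PySem.List.pyGetD range_y 1 0 with hy1
  set H := (y1 + 1 - y0).toNat with hH
  set W := (x1 + 1 - x0).toNat with hW
  show (cubes.foldl (pvBUpdate z x0 x1 y0 y1) ((List.range H).map (fun _ => List.replicate W '.'))).map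
      (fun r => String.ofList r) = _
  rw [List.map_const', List.length_range]
  set Gf := cubes.foldl (pvBUpdate z x0 x1 y0 y1) (List.replicate H (List.replicate W '.')) with hGf
  have hlen : Gf.length = H := by
    rw [hGf, pvFold_length]; simp
  have hrow : ∀ r ∈ Gf, r.length = W := by
    rw [hGf]
    exact pvFold_rowlen z x0 x1 y0 y1 cubes W _ (by intro r hr; rw [List.eq_of_mem_replicate hr]; simp)
  apply List.ext_getElem?
  intro i
  rw [List.getElem?_map, List.getElem?_map]
  by_cases hi : i < H
  · rw [List.getElem?_eq_getElem (by rw [hlen]; exact hi), List.getElem?_range hi]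
    simp only [Option.map_some, Option.some.injEq]
    congr 1
    have hriw : Gf[i].length = W := hrow _ (List.getElem_mem _)
    apply List.ext_getElem?
    intro j
    by_cases hj : j < W
    · have hc := pvFold_cell z x0 x1 y0 y1 cubes i j (List.replicate H (List.replicate W '.'))
        (by rw [List.length_replicate]) (by intro r hr; rw [List.eq_of_mem_replicate hr, List.length_replicate])
        (by simpa using hi) hj
      rw [← hGf, List.getElem?_eq_getElem (by rw [hlen]; exact hi)] at hc
      simp only [Option.bind_some] at hc
      rw [hc, List.getElem?_map, List.getElem?_range hj]
      simp only [Option.map_some]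
      split
      · rfl
      · simp [List.getElem?_replicate, hi, hj]
    · rw [List.getElem?_eq_none (by rw [hriw]; omega),
          List.getElem?_eq_none (by simp only [List.length_map, List.length_range]; omega)]
  · rw [List.getElem?_eq_none (by rw [hlen]; omega),
        List.getElem?_eq_none (by simp only [List.length_range]; omega)]
    rfl

-- A's inner loop: string concatenation over a list is ofList of the mapped list
lemma pvStrFold (P : Int → Prop) [DecidablePred P] :
    ∀ (xs : List Int) (s : String),
      xs.foldl (fun s x => if P x then s ++ "#" else s ++ ".") s =
        s ++ String.ofList (xs.map (fun x => if P x then '#' else '.')) := by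
  intro xs
  induction xs with
  | nil => intro s; apply String.ext; simp
  | cons x xs ih =>
    intro s
    rw [List.foldl_cons, ih, List.map_cons]
    by_cases hp : P x <;>
      · simp only [hp, if_pos, if_neg, ite_true, ite_false]
        apply String.ext
        simp

-- A's result in the same closed form
lemma pvA_eq (cubes : List (List Int)) (range_x range_y : List Int) (z : Int) :
    slice_to_str cubes range_x range_y z =
      (List.range (PySem.List.pyGetD range_y 1 0 + 1 - PySem.List.pyGetD range_y 0 0).toNat).map
        (fun (i : Nat) => String.ofList ((List.range (PySem.List.pyGetD range_x 1 0 + 1 - PySem.List.pyGetD range_x 0 0).toNat).map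
          (fun (j : Nat) => if [PySem.List.pyGetD range_x 0 0 + (j : Int), PySem.List.pyGetD range_y 0 0 + (i : Int), z] ∈ cubes then '#' else '.'))) := by
  set x0 := PySem.List.pyGetD range_x 0 0 with hx0
  set x1 := PySem.List.pyGetD range_x 1 0 with hx1
  set y0 := PySem.List.pyGetD range_y 0 0 with hy0
  set y1 := PySem.List.pyGetD range_y 1 0 with hy1
  show (PySem.List.pyRange y0 (y1 + 1) 1).foldl _ [] = _
  rw [PySem.List.pyRange_one y0 (y1 + 1)]
  rw [PySem.List.foldl_append_singleton_eq_map
    (fun y => (PySem.List.pyRange x0 (x1 + 1) 1).foldl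
      (fun s x => if [x, y, z] ∈ cubes then s ++ "#" else s ++ ".") "")]
  rw [List.nil_append, List.map_map]
  apply List.map_congr_left
  intro i hi
  simp only [Function.comp_apply]
  rw [pvStrFold (fun x => [x, y0 + (i : Int), z] ∈ cubes) (PySem.List.pyRange x0 (x1 + 1) 1) ""]
  rw [PySem.List.pyRange_one x0 (x1 + 1), List.map_map]
  apply String.ext
  simp

-- ===== VERDICT (by name: the statement is the Claim_ definition above) =====
theorem slice_to_str_spec : Claim_equal_slice_to_str := by
  intro cubes range_x range_y z _ _
  unfold Spec_slice_to_str
  rw [pvA_eq, pvAlt_eq]
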